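-- pv_equiv track=rewrite | github.com/Msangwool/Algorithm | 프로그래머스/0/181890. 왼쪽 오른쪽/왼쪽 오른쪽.py | solution
-- ===== SOURCE A (Python) =====
-- def solution(str_list):
--     answerL = []
--
--     idx = -1;
--     for i, s in enumerate(str_list):
--         answerL
--         if s == 'l':
--             return answerL
--         if s == 'r':
--             idx = i
--             break
--         answerL.append(s)
--
--     if idx != -1:
--         return str_list[idx+1:]
--
--     return []
-- ===== SOURCE B (Python) =====
-- def solution(str_list):
--     for i, s in enumerate(str_list):
--         if s == 'l':
--             return str_list[:i]
--         if s == 'r':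
--             return str_list[i+1:]
--     return []
-- ===== Notes on version B (the rewrite author's own statement) =====
-- stated objective: simpler
-- what changed: Replaces A's incrementally built answerL accumulator and break/sentinel-idx postprocessing with a single enumerate loop that slices the original list directly (prefix before the first 'l', suffix after the first 'r', empty when neither occurs).
import Mathlib
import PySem

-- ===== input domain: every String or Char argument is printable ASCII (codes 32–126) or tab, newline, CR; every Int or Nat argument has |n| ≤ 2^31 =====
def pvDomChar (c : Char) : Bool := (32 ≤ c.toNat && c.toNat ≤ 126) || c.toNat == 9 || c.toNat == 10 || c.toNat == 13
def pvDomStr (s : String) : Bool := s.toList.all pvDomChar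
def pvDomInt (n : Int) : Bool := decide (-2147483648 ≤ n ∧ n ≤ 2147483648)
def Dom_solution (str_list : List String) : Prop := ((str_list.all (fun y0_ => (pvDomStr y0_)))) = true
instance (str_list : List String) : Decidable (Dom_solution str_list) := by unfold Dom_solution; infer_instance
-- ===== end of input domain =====

-- B replaces A's incremental accumulator (append-per-element, asymmetric slice on 'r')
-- with direct slicing from the discovered index: objective = simpler.


-- ===== PORT A =====
-- the for-loop: either an early `return answerL` (Sum.inl) or the final idx (Sum.inr;
-- -1 when no 'r' was found, matching A's sentinel)
def solutionLoop : List String → Int → List String → (List String ⊕ Int)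
  | [], _, _ => Sum.inr (-1)
  | s :: rest, i, answerL =>
      if s = "l" then Sum.inl answerL
      else if s = "r" then Sum.inr i
      else solutionLoop rest (i + 1) (answerL ++ [s])

def solution (str_list : List String) : List String :=
  match solutionLoop str_list 0 [] with
  | Sum.inl ans => ans
  | Sum.inr idx => if idx ≠ -1 then PySem.List.slice str_list (some (idx + 1)) none else []

-- ===== PORT B =====
-- single scan carrying only the index; slices the original list directly
def solutionAltLoop (full : List String) : List String → Nat → List String
  | [], _ => []
  | s :: rest, i =>
      if s = "l" then full.take i
      else if s = "r" then full.drop (i + 1)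
      else solutionAltLoop full rest (i + 1)

def solution_alt (str_list : List String) : List String :=
  solutionAltLoop str_list str_list 0

-- ===== PRECONDITION & SPEC =====
def Spec_solution (str_list : List String) (out : List String) : Prop := out = solution_alt str_list
instance (str_list : List String) (out : List String) : Decidable (Spec_solution str_list out) := by unfold Spec_solution; infer_instance

-- ===== CLAIM (what is proved, stated in full; the proofs are below) =====
def Claim_equal_solution : Prop := ∀ (str_list : List String), Dom_solution str_list → Spec_solution str_list (solution str_list)

-- ===== LEMMAS AND PROOFS =====

theorem solutionLoop_eq (rest : List String) : ∀ (acc : List String),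
    (match solutionLoop rest (acc.length : Int) acc with
      | Sum.inl ans => ans
      | Sum.inr idx => if idx ≠ -1 then PySem.List.slice (acc ++ rest) (some (idx + 1)) none else []) =
    solutionAltLoop (acc ++ rest) rest acc.length := by
  induction rest with
  | nil => intro acc; simp [solutionLoop, solutionAltLoop]
  | cons s rest ih =>
      intro acc
      by_cases hl : s = "l"
      · simp [solutionLoop, solutionAltLoop, hl]
      · by_cases hr : s = "r"
        · have hcast : ((acc.length : Int) + 1) = ((acc.length + 1 : Nat) : Int) := by push_cast; ring
          have hne : ¬((acc.length : Int) = -1) := by omega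
          simp only [solutionLoop, solutionAltLoop, if_neg hl, if_pos hr]
          rw [hcast, PySem.List.slice_from_natCast, if_pos hne]
        · have h1 : (acc.length : Int) + 1 = (((acc ++ [s]).length : Nat) : Int) := by
            simp
          have h2 : acc ++ s :: rest = (acc ++ [s]) ++ rest := by simp
          simp only [solutionLoop, solutionAltLoop, hl, hr, if_false]
          rw [h1, h2]
          have := ih (acc ++ [s])
          simpa using this

-- ===== VERDICT (by name: the statement is the Claim_ definition above) =====
theorem solution_spec : Claim_equal_solution := by
  intro str_list _
  unfold Spec_solution solution solution_alt
  have := solutionLoop_eq str_list []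
  simpa using this
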